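-- pv_equiv track=rewrite | github.com/mateus-maximo/algoritmos-prog-avancada | Atividades Continuas 2/Atividade7/solution.py | process_case
-- ===== SOURCE A (Python) =====
-- def factorize(m, primes):
--     """
--     Fatora o número m em seus fatores primos.
--     Retorna um dicionário {primo: expoente}.
--     """
--     factors = {}
--     temp = m
--     for p in primes:
--         if p * p > temp:
--             break
--         if temp % p == 0:
--             count = 0
--             while temp % p == 0:
--                 count += 1
--                 temp //= p
--             factors[p] = count
--         if temp == 1:
--             break
--     if temp > 1:
--         factors[temp] = factors.get(temp, 0) + 1
--     return factors
--
-- def exponent_in_factorial(n, p):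
--     """
--     Conta o expoente do primo p em n! usando a fórmula de Legendre.
--     """
--     count = 0
--     power = p
--     while power <= n:
--         count += n // power
--         power *= p
--     return count
--
-- def process_case(n, m, primes):
--     """
--     Retorna True se m divide n!, caso contrário, retorna False.
--     """
--     # Caso especial: m == 0 (divisão por zero é indefinida)
--     if m == 0:
--         return False
--     # 1 divide qualquer número.
--     if m == 1:
--         return True
--     # Para n = 0 ou 1, n! = 1, então apenas m == 1 divide.
--     if n < 2:
--         return m == 1
--
--     # Fatora m.
--     factors = factorize(m, primes)
--     # Para cada fator primo, n! deve ter pelo menos o mesmo expoente que m exige.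
--     for p, required_exp in factors.items():
--         if exponent_in_factorial(n, p) < required_exp:
--             return False
--     return True
-- ===== SOURCE B (Python) =====
-- def _legendre(n, p, power):
--     return 0 if power > n else n // power + _legendre(n, p, power * p)
--
-- def process_case(n, m, primes):
--     if m == 0:
--         return False
--     if m == 1:
--         return True
--     if n < 2:
--         return m == 1
--     temp = m
--     for p in primes:
--         if p * p > temp:
--             break
--         if temp % p == 0:
--             cnt = 0
--             while temp % p == 0:
--                 cnt += 1
--                 temp //= p
--             if _legendre(n, p, p) < cnt:
--                 return False
--         if temp == 1:
--             return True
--     return temp <= 1 or _legendre(n, temp, temp) >= 1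
-- ===== Notes on version B (the rewrite author's own statement) =====
-- stated objective: simpler
-- what changed: B fuses A's three phases (build a prime->exponent dict via factorize, then a second loop over dict items calling the Legendre helper) into one early-exit pass over primes with no dict at all, checks each exponent inline the moment it is extracted, handles the leftover cofactor by a single expression, and computes the Legendre count by recursion instead of a while loop.
-- outside the precondition, e.g. on process_case(5, 4, [2, 1]): A returns True, B returns True
import Mathlib
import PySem

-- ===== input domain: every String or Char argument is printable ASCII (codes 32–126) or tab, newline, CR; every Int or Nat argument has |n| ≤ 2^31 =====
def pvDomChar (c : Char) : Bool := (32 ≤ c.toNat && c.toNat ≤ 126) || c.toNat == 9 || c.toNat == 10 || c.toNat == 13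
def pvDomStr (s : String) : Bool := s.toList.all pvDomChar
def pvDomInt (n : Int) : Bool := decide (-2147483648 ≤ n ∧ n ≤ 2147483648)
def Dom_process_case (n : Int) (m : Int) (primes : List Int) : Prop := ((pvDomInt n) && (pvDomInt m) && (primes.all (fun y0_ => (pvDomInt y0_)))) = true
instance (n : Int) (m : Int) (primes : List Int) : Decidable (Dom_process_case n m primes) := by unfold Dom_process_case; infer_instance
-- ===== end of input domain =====

-- B fuses A's factorize / dict / second check loop into one early-exit pass with no dict (objective: simpler).

-- ===== PORT A =====
-- inner `while temp % p == 0: count += 1; temp //= p` of factorize; fuel makes it total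
-- (temp.natAbs + 1 steps suffice for every |p| ≥ 2, the inputs Pre_ admits)
def pvDivLoopA (p : Int) : Nat → Int → Int → Int × Int
  | 0, count, temp => (count, temp)
  | f + 1, count, temp =>
    if PySem.Int.mod temp p = 0 then pvDivLoopA p f (count + 1) (PySem.Int.floordiv temp p)
    else (count, temp)

-- `while power <= n: count += n // power; power *= p` of exponent_in_factorial; fuel-totalized
def pvExpoLoopA (n p : Int) : Nat → Int → Int → Int
  | 0, count, _ => count
  | f + 1, count, power =>
    if power ≤ n then pvExpoLoopA n p f (count + PySem.Int.floordiv n power) (power * p)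
    else count

def exponent_in_factorial (n p : Int) : Int := pvExpoLoopA n p (n.natAbs + 2) 0 p

-- the `for p in primes` loop of factorize (break → return current state)
def pvFactGo : List Int → Int → PySem.Dict Int Int → PySem.Dict Int Int × Int
  | [], temp, fac => (fac, temp)
  | p :: rest, temp, fac =>
    if p * p > temp then (fac, temp)
    else
      if PySem.Int.mod temp p = 0 then
        let ct := pvDivLoopA p (temp.natAbs + 1) 0 temp
        if ct.2 = 1 then (fac.insert p ct.1, ct.2)
        else pvFactGo rest ct.2 (fac.insert p ct.1)
      else
        if temp = 1 then (fac, temp) else pvFactGo rest temp fac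

def factorize (m : Int) (primes : List Int) : PySem.Dict Int Int :=
  let r := pvFactGo primes m PySem.Dict.empty
  if r.2 > 1 then r.1.insert r.2 (r.1.getD r.2 0 + 1) else r.1

-- `for p, required_exp in factors.items(): if exponent_in_factorial(n, p) < required_exp: return False`
def pvCheckGo (n : Int) : List (Int × Int) → Bool
  | [] => true
  | (p, e) :: rest => if exponent_in_factorial n p < e then false else pvCheckGo n rest

def process_case (n : Int) (m : Int) (primes : List Int) : Bool :=
  if m = 0 then false
  else if m = 1 then true
  else if n < 2 then decide (m = 1)
  else pvCheckGo n (factorize m primes).items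

-- ===== PORT B =====
-- B's recursive Legendre helper `_legendre(n, p, power)`; fuel-totalized like A's loop
def pvLegLoopB (n p : Int) : Nat → Int → Int
  | 0, _ => 0
  | f + 1, power =>
    if power > n then 0 else PySem.Int.floordiv n power + pvLegLoopB n p f (power * p)

def pvLegendreB (n p : Int) : Int := pvLegLoopB n p (n.natAbs + 2) p

-- B's inner `while temp % p == 0` loop (same totalization)
def pvDivLoopB (p : Int) : Nat → Int → Int → Int × Int
  | 0, cnt, temp => (cnt, temp)
  | f + 1, cnt, temp =>
    if PySem.Int.mod temp p = 0 then pvDivLoopB p f (cnt + 1) (PySem.Int.floordiv temp p)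
    else (cnt, temp)

-- B's final line `return temp <= 1 or _legendre(n, temp, temp) >= 1`
def pvLeftB (n temp : Int) : Bool := decide (temp ≤ 1) || decide (pvLegendreB n temp ≥ 1)

-- B's single fused pass over primes (break → the final return line)
def pvBGo (n : Int) : List Int → Int → Bool
  | [], temp => pvLeftB n temp
  | p :: rest, temp =>
    if p * p > temp then pvLeftB n temp
    else
      if PySem.Int.mod temp p = 0 then
        let ct := pvDivLoopB p (temp.natAbs + 1) 0 temp
        if pvLegendreB n p < ct.1 then false
        else if ct.2 = 1 then true
        else pvBGo n rest ct.2
      else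
        if temp = 1 then true else pvBGo n rest temp

def process_case_alt (n : Int) (m : Int) (primes : List Int) : Bool :=
  if m = 0 then false
  else if m = 1 then true
  else if n < 2 then decide (m = 1)
  else pvBGo n primes m

-- ===== PRECONDITION & SPEC =====
-- Pre_ excludes primes lists containing 0, 1 or -1 (when the factorization is reached, i.e. m ∉ {0,1} and n ≥ 2):
-- there A's factorize loop divides by zero or loops forever; the exclusion is conservative — on a few such lists an
-- earlier break lets A return, and B returns the same value there.
def Pre_process_case (n : Int) (m : Int) (primes : List Int) : Prop :=
  m = 0 ∨ m = 1 ∨ n < 2 ∨ (¬ (0:Int) ∈ primes ∧ ¬ (1:Int) ∈ primes ∧ ¬ (-1:Int) ∈ primes)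
instance (n : Int) (m : Int) (primes : List Int) : Decidable (Pre_process_case n m primes) := by
  unfold Pre_process_case; infer_instance

def pvWitness_process_case : Int × Int × List Int := (6, 4, [2, 3])

def Spec_process_case (n : Int) (m : Int) (primes : List Int) (out : Bool) : Prop := out = process_case_alt n m primes
instance (n : Int) (m : Int) (primes : List Int) (out : Bool) : Decidable (Spec_process_case n m primes out) := by unfold Spec_process_case; infer_instance

-- ===== CLAIM (what is proved, stated in full; the proofs are below) =====
def Claim_equal_process_case : Prop := ∀ (n : Int) (m : Int) (primes : List Int), Dom_process_case n m primes → Pre_process_case n m primes → Spec_process_case n m primes (process_case n m primes)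

-- ===== LEMMAS AND PROOFS =====

-- the two divide-out loops are the same function
theorem divLoop_eq (p : Int) : ∀ (f : Nat) (c temp : Int), pvDivLoopA p f c temp = pvDivLoopB p f c temp := by
  intro f
  induction f with
  | zero => intro c temp; rfl
  | succ f ih =>
    intro c temp
    simp only [pvDivLoopA, pvDivLoopB]
    split_ifs with h
    · exact ih _ _
    · rfl

-- A's accumulator-style Legendre loop equals B's recursive one
theorem expo_eq_leg (n p : Int) : ∀ (f : Nat) (c power : Int),
    pvExpoLoopA n p f c power = c + pvLegLoopB n p f power := by
  intro f
  induction f with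
  | zero => intro c power; simp [pvExpoLoopA, pvLegLoopB]
  | succ f ih =>
    intro c power
    simp only [pvExpoLoopA, pvLegLoopB]
    by_cases h : power ≤ n
    · rw [if_pos h, if_neg (by omega), ih]; ring
    · rw [if_neg h, if_pos (by omega)]; ring

theorem expoA_eq_legB (n p : Int) : exponent_in_factorial n p = pvLegendreB n p := by
  unfold exponent_in_factorial pvLegendreB
  rw [expo_eq_leg]; ring

-- what the divide-out loop guarantees when |p| ≥ 2 and the fuel covers |temp|
theorem divLoop_spec (p : Int) (hp : 2 ≤ p.natAbs) : ∀ (f : Nat) (c temp : Int), temp ≠ 0 → temp.natAbs ≤ f →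
    (pvDivLoopA p f c temp).2 ∣ temp ∧ (pvDivLoopA p f c temp).2 ≠ 0 ∧
      PySem.Int.mod (pvDivLoopA p f c temp).2 p ≠ 0 := by
  intro f
  induction f with
  | zero => intro c temp ht hf; omega
  | succ f ih =>
    intro c temp ht hf
    simp only [pvDivLoopA]
    split_ifs with h
    · set t' := PySem.Int.floordiv temp p with hfd
      have hex : t' * p = temp := by
        have h2 := PySem.Int.floordiv_mul_add_mod temp p
        rw [← hfd] at h2
        omega
      have ht' : t' ≠ 0 := by
        intro h0; rw [h0] at hex; simp at hex; omega
      have habs : t'.natAbs ≤ f := by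
        have h1 : temp.natAbs = t'.natAbs * p.natAbs := by
          rw [← hex, Int.natAbs_mul]
        have h2 : 1 ≤ t'.natAbs := by omega
        nlinarith
      obtain ⟨d1, d2, d3⟩ := ih (c + 1) t' ht' habs
      exact ⟨d1.trans ⟨p, hex.symm⟩, d2, d3⟩
    · exact ⟨dvd_refl _, ht, h⟩

-- A's check loop over a concatenation
theorem checkGo_append (n : Int) (xs ys : List (Int × Int)) :
    pvCheckGo n (xs ++ ys) = (pvCheckGo n xs && pvCheckGo n ys) := by
  induction xs with
  | nil => simp [pvCheckGo]
  | cons x t ih =>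
    obtain ⟨p, e⟩ := x
    simp only [List.cons_append, pvCheckGo]
    split_ifs <;> simp [ih]

-- A's post-loop leftover insertion + check equals B's final return line, over a dict whose keys do not divide temp
def pvFinalize (r : PySem.Dict Int Int × Int) : List (Int × Int) :=
  if r.2 > 1 then (r.1.insert r.2 (r.1.getD r.2 0 + 1)).items else r.1.items

theorem finalize_eq (n temp : Int) (fac : PySem.Dict Int Int) (ht : temp ≠ 0)
    (hfac : ∀ q ∈ fac.keys, PySem.Int.mod temp q ≠ 0) :
    pvCheckGo n (pvFinalize (fac, temp)) = (pvCheckGo n fac.items && pvLeftB n temp) := by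
  unfold pvFinalize pvLeftB
  by_cases h1 : temp > 1
  · have hmem : ¬ temp ∈ fac.keys := fun hm => hfac temp hm ((PySem.Int.mod_eq_zero_iff_dvd temp temp).mpr (dvd_refl temp))
    have hcont : fac.contains temp = false := by
      rw [PySem.Dict.contains_eq_decide_mem_keys]; simpa using hmem
    rw [if_pos h1, PySem.Dict.items_insert_of_not_contains _ _ hcont,
        PySem.Dict.getD_of_not_contains _ _ hcont, checkGo_append]
    have hone : pvCheckGo n [(temp, (0:Int) + 1)]
        = (decide (temp ≤ 1) || decide (pvLegendreB n temp ≥ 1)) := by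
      simp only [pvCheckGo, expoA_eq_legB]
      have hle : ¬ temp ≤ 1 := by omega
      by_cases hc : pvLegendreB n temp < 0 + 1
      · rw [if_pos hc]
        symm
        simp only [Bool.or_eq_false_iff, decide_eq_false_iff_not]
        exact ⟨hle, by omega⟩
      · rw [if_neg hc]
        symm
        simp only [pvCheckGo, Bool.or_eq_true, decide_eq_true_eq]
        right; omega
    rw [hone]
  · simp only [if_neg h1]
    have : (decide (temp ≤ 1) || decide (pvLegendreB n temp ≥ 1)) = true := by simp; omega
    rw [this, Bool.and_true]

-- the main loop correspondence: A's dict-building pass followed by the check pass equals B's fused pass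
theorem mainLoop (n : Int) : ∀ (primes : List Int) (temp : Int) (fac : PySem.Dict Int Int),
    (∀ p ∈ primes, 2 ≤ p.natAbs) → temp ≠ 0 →
    (∀ q ∈ fac.keys, PySem.Int.mod temp q ≠ 0) → fac.keys.Nodup →
    pvCheckGo n (pvFinalize (pvFactGo primes temp fac)) = (pvCheckGo n fac.items && pvBGo n primes temp) := by
  intro primes
  induction primes with
  | nil =>
    intro temp fac hP ht hfac hnd
    simp only [pvFactGo, pvBGo]
    exact finalize_eq n temp fac ht hfac
  | cons p rest ih =>
    intro temp fac hP ht hfac hnd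
    have hp : 2 ≤ p.natAbs := hP p (List.mem_cons_self)
    have hPr : ∀ q ∈ rest, 2 ≤ q.natAbs := fun q hq => hP q (List.mem_cons_of_mem _ hq)
    simp only [pvFactGo, pvBGo]
    by_cases hbreak : p * p > temp
    · rw [if_pos hbreak, if_pos hbreak]
      exact finalize_eq n temp fac ht hfac
    · rw [if_neg hbreak, if_neg hbreak]
      by_cases hdiv : PySem.Int.mod temp p = 0
      · rw [if_pos hdiv, if_pos hdiv]
        rw [← divLoop_eq]
        obtain ⟨d1, d2, d3⟩ := divLoop_spec p hp (temp.natAbs + 1) 0 temp ht (by omega)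
        set ct := pvDivLoopA p (temp.natAbs + 1) 0 temp with hct
        -- p is not yet a key of fac
        have hmem : ¬ p ∈ fac.keys := fun hm => hfac p hm hdiv
        have hcont : fac.contains p = false := by
          rw [PySem.Dict.contains_eq_decide_mem_keys]; simpa using hmem
        have hitems : (fac.insert p ct.1).items = fac.items ++ [(p, ct.1)] :=
          PySem.Dict.items_insert_of_not_contains _ _ hcont
        have hfac' : ∀ q ∈ (fac.insert p ct.1).keys, PySem.Int.mod ct.2 q ≠ 0 := by
          intro q hq
          rcases (PySem.Dict.mem_keys_insert _ _ _ _).mp hq with h | h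
          · exact h ▸ d3
          · intro h0
            exact hfac q h ((PySem.Int.mod_eq_zero_iff_dvd temp q).mpr
              (((PySem.Int.mod_eq_zero_iff_dvd ct.2 q).mp h0).trans d1))
        have hnd' : (fac.insert p ct.1).keys.Nodup := PySem.Dict.nodup_keys_insert _ _ _ hnd
        have hleg := expoA_eq_legB n p
        have hone : pvCheckGo n [(p, ct.1)] = (if pvLegendreB n p < ct.1 then false else true) := by
          simp only [pvCheckGo, expoA_eq_legB]
        by_cases h1 : ct.2 = 1
        · rw [if_pos h1, if_pos h1]
          have hfin1 : pvFinalize (fac.insert p ct.1, ct.2) = (fac.insert p ct.1).items := by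
            unfold pvFinalize; rw [if_neg (by omega)]
          rw [hfin1, hitems, checkGo_append, hone]
        · rw [if_neg h1, if_neg h1]
          rw [ih ct.2 (fac.insert p ct.1) hPr d2 hfac' hnd', hitems, checkGo_append, hone]
          by_cases hc : pvLegendreB n p < ct.1 <;> simp [hc]
      · rw [if_neg hdiv, if_neg hdiv]
        by_cases h1 : temp = 1
        · rw [if_pos h1, if_pos h1]
          have : pvFinalize (fac, temp) = fac.items := by
            unfold pvFinalize; rw [if_neg (by omega)]
          rw [this, Bool.and_true]
        · rw [if_neg h1, if_neg h1]
          exact ih temp fac hPr ht hfac hnd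

-- ===== VERDICT (by name: the statement is the Claim_ definition above) =====
theorem process_case_spec : Claim_equal_process_case := by
  intro n m primes _ hpre
  unfold Spec_process_case process_case process_case_alt
  by_cases h0 : m = 0
  · simp [h0]
  by_cases h1 : m = 1
  · simp [h1]
  by_cases h2 : n < 2
  · simp [h0, h1, h2]
  simp only [if_neg h0, if_neg h1, if_neg h2]
  have hP : ∀ p ∈ primes, 2 ≤ p.natAbs := by
    rcases hpre with h | h | h | ⟨ha, hb, hc⟩
    · exact absurd h h0
    · exact absurd h h1
    · exact absurd h h2
    · intro p hp
      have e0 : p ≠ 0 := fun e => ha (e ▸ hp)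
      have e1 : p ≠ 1 := fun e => hb (e ▸ hp)
      have e2 : p ≠ -1 := fun e => hc (e ▸ hp)
      omega
  have hfin : (factorize m primes).items = pvFinalize (pvFactGo primes m PySem.Dict.empty) := by
    unfold factorize pvFinalize
    by_cases h : (pvFactGo primes m PySem.Dict.empty).2 > 1 <;> simp [h]
  rw [hfin, mainLoop n primes m PySem.Dict.empty hP h0
        (by simp [PySem.Dict.keys_empty]) (by simp [PySem.Dict.keys_empty])]
  exact Bool.true_and _
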